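-- pv_equiv track=rewrite | github.com/estuary/connectors | source-google-sheets-native/source_google_sheets_native/api.py | default_column_headers
-- ===== SOURCE A (Python) =====
-- def default_column_headers(n: int) -> list[str]:
--     """
--     Generates a list of Google Sheets column identifiers (A, B, C, ..., AA, AB, ...) for a given number of columns.
--     """
--     columns = []
--     for i in range(1, n + 1):
--         column = ""
--         while i > 0:
--             i, remainder = divmod(i - 1, 26)
--             column = chr(65 + remainder) + column
--         columns.append(column)
--     return columns
-- ===== SOURCE B (Python) =====
-- def default_column_headers(n: int) -> list[str]:
--     """
--     Generates a list of Google Sheets column identifiers (A, B, C, ..., AA, AB, ...) for a given number of columns.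
--     """
--     columns = []
--     digits = []  # running label as digit values 0..25, most significant first
--     for _ in range(n):
--         # increment the odometer: bump the last digit, carrying while a digit is 25
--         j = len(digits) - 1
--         while j >= 0 and digits[j] == 25:
--             digits[j] = 0
--             j -= 1
--         if j < 0:
--             digits.insert(0, 0)
--         else:
--             digits[j] += 1
--         columns.append("".join(chr(65 + d) for d in digits))
--     return columns
-- ===== Notes on version B (the rewrite author's own statement) =====
-- stated objective: alternative
-- what changed: Instead of converting each index i independently to bijective base-26 with an inner divmod while-loop, B maintains one running label as an odometer of digit values, incrementing it with carry propagation once per output and rendering it.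
import Mathlib
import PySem

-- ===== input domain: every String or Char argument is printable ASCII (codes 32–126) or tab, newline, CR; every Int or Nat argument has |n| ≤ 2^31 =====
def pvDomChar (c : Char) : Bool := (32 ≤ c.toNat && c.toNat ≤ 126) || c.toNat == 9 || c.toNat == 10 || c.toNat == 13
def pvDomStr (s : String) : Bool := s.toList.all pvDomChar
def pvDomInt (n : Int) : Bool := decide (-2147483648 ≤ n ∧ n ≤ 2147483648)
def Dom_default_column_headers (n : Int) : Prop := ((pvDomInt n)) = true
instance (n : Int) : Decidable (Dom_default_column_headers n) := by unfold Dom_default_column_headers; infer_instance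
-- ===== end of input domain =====

-- B replaces A's per-index divmod conversion by one running odometer label incremented with carry; return values agree, objective: alternative.

-- ===== PORT A =====
-- inner 'while i > 0' loop of A; the string is built as a List Char (String.mk at the end)
def pvConvertA (i : Int) (col : List Char) : List Char :=
  if h : i > 0 then
    pvConvertA (PySem.Int.floordiv (i - 1) 26)
      (Char.ofNat (65 + (PySem.Int.mod (i - 1) 26)).toNat :: col)
  else col
termination_by i.toNat
decreasing_by
  have h26 : (0:Int) < 26 := by omega
  rw [PySem.Int.floordiv_eq_ediv_of_pos h26]
  omega

def default_column_headers (n : Int) : List String :=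
  (PySem.List.pyRange 1 (n + 1) 1).foldl
    (fun columns i => columns ++ [String.mk (pvConvertA i [])]) []

-- ===== PORT B =====
-- B's inner while: scan the digits from the back, zeroing 25s; bump the first non-25,
-- or prepend a fresh 0-digit if the carry ran off the front.  Expressed as recursion
-- over the reversed digit list (exactly the order the Python loop visits).
def pvIncRev : List Int → List Int
  | [] => [0]
  | d :: rest => if d == 25 then 0 :: pvIncRev rest else (d + 1) :: rest

def pvInc (ds : List Int) : List Int := (pvIncRev ds.reverse).reverse

-- "".join(chr(65 + d) for d in digits)
def pvRender (ds : List Int) : String := String.mk (ds.map (fun d => Char.ofNat (65 + d).toNat))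

def default_column_headers_alt (n : Int) : List String :=
  ((List.range n.toNat).foldl
    (fun (st : List Int × List String) _ =>
      let digits := pvInc st.1
      (digits, st.2 ++ [pvRender digits])) ([], [])).2

-- ===== PRECONDITION & SPEC =====
def Spec_default_column_headers (n : Int) (out : List String) : Prop := out = default_column_headers_alt n
instance (n : Int) (out : List String) : Decidable (Spec_default_column_headers n out) := by unfold Spec_default_column_headers; infer_instance

-- ===== CLAIM (what is proved, stated in full; the proofs are below) =====
def Claim_equal_default_column_headers : Prop := ∀ (n : Int), Dom_default_column_headers n → Spec_default_column_headers n (default_column_headers n)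

-- ===== LEMMAS AND PROOFS =====

-- explicit Nat->Int cast used by the proofs (avoids coercion elaboration quirks)
def pvCast (d : Nat) : Int := Int.ofNat d

-- bijective base-26 digit values (0..25) of i, most significant first; repN 0 = []
def repN : Nat → List Nat
  | 0 => []
  | (i + 1) => repN (i / 26) ++ [i % 26]
decreasing_by
  have := Nat.div_le_self i 26
  omega

-- A's inner loop computes repN, rendered to chars, prepended to col
theorem convA (i : Nat) (col : List Char) :
    pvConvertA (i : Int) col = (repN i).map (fun d => Char.ofNat (65 + d)) ++ col := by
  induction i using Nat.strong_induction_on generalizing col with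
  | _ i ih =>
    match i with
    | 0 => rw [pvConvertA]; simp [repN]
    | (m + 1) =>
      rw [pvConvertA]
      have hpos : ((m + 1 : Nat) : Int) > 0 := by push_cast; omega
      rw [dif_pos hpos]
      have h1 : ((m + 1 : Nat) : Int) - 1 = ((m : Nat) : Int) := by push_cast; omega
      have h26 : ((26 : Nat) : Int) = (26 : Int) := by norm_num
      rw [h1, ← h26, PySem.Int.floordiv_natCast, PySem.Int.mod_natCast]
      rw [ih (m / 26) (by omega)]
      simp [repN]
      have hch : ((65 : Int) + (m : Int) % 26).toNat = 65 + m % 26 := by omega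
      rw [hch]

-- odometer increment on the reversed digit list takes repN k to repN (k+1)
theorem incRev_rep (k : Nat) :
    pvIncRev (((repN k).map pvCast).reverse)
      = ((repN (k + 1)).map pvCast).reverse := by
  induction k using Nat.strong_induction_on with
  | _ k ih =>
    match k with
    | 0 => simp [repN, pvIncRev, pvCast]
    | (m + 1) =>
      rw [repN]
      conv_rhs => rw [repN]
      simp only [List.map_append, List.reverse_append, List.map_cons, List.map_nil,
        List.reverse_cons, List.reverse_nil, List.nil_append, List.cons_append]
      rw [pvIncRev]
      by_cases h : m % 26 = 25
      · rw [if_pos (by simp [pvCast, h])]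
        rw [ih (m / 26) (by have := Nat.div_le_self m 26; omega)]
        have h1 : (m + 1) % 26 = 0 := by omega
        have h2 : (m + 1) / 26 = m / 26 + 1 := by omega
        rw [h1, h2]
        simp [repN, pvCast]
      · rw [if_neg (by simp [pvCast]; omega)]
        have h1 : (m + 1) % 26 = m % 26 + 1 := by omega
        have h2 : (m + 1) / 26 = m / 26 := by omega
        rw [h1, h2]
        simp [pvCast]

theorem inc_rep (k : Nat) :
    pvInc ((repN k).map pvCast) = (repN (k + 1)).map pvCast := by
  unfold pvInc
  rw [incRev_rep, List.reverse_reverse]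

-- the common closed form
def pvSpine (n : Nat) : List String :=
  (List.range n).map (fun k => String.mk ((repN (k + 1)).map (fun d => Char.ofNat (65 + d))))

theorem render_rep (k : Nat) :
    pvRender ((repN k).map pvCast)
      = String.mk ((repN k).map (fun d => Char.ofNat (65 + d))) := by
  unfold pvRender
  rw [List.map_map]
  apply congrArg String.mk
  apply List.map_congr_left
  intro d _
  simp only [Function.comp, pvCast, Int.ofNat_eq_natCast]
  have hch : ((65 : Int) + (d : Int)).toNat = 65 + d := by omega
  rw [hch]

-- A's foldl-append over a list is acc ++ map
theorem foldl_app (l : List Int) (acc : List String) (f : Int → String) :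
    l.foldl (fun columns i => columns ++ [f i]) acc = acc ++ l.map f := by
  induction l generalizing acc with
  | nil => simp
  | cons x xs ih => simp [List.foldl_cons, ih, List.append_assoc]

theorem A_spine (n : Int) : default_column_headers n = pvSpine n.toNat := by
  unfold default_column_headers pvSpine
  rw [foldl_app]
  rw [PySem.List.pyRange_one]
  have hb : ((n : Int) + 1 - 1).toNat = n.toNat := by omega
  rw [hb, List.map_map, List.nil_append]
  apply List.map_congr_left
  intro k _
  have h1 : ((1 : Int) + (k : Int)) = ((k + 1 : Nat) : Int) := by push_cast; omega
  simp only [Function.comp]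
  rw [h1, convA]
  simp

-- invariant of B's fold
theorem B_inv (m : Nat) :
    (List.range m).foldl
      (fun (st : List Int × List String) _ =>
        let digits := pvInc st.1
        (digits, st.2 ++ [pvRender digits])) ([], [])
      = ((repN m).map pvCast, pvSpine m) := by
  induction m with
  | zero => simp [repN, pvSpine]
  | succ m ih =>
    rw [List.range_succ, List.foldl_append, ih]
    simp only [List.foldl_cons, List.foldl_nil]
    rw [inc_rep]
    unfold pvSpine
    rw [List.range_succ, List.map_append]
    simp [render_rep]

theorem B_spine (n : Int) : default_column_headers_alt n = pvSpine n.toNat := by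
  unfold default_column_headers_alt
  rw [B_inv]

-- ===== VERDICT (by name: the statement is the Claim_ definition above) =====
theorem default_column_headers_spec : Claim_equal_default_column_headers := by
  intro n _
  unfold Spec_default_column_headers
  rw [A_spine, B_spine]
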